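-- pv_equiv track=rewrite | github.com/joaorgoulart/line_encoding | emitter/emitter.py | ami_encode
-- ===== SOURCE A (Python) =====
-- def ami_encode(binary_string):
--
--     ami_string = []
--     current_polarity = '-'  # Começamos com a polaridade negativa
--
--     for bit in binary_string:
--         if bit == '0':
--             ami_string.append('0')
--         else:
--             if current_polarity == '-':
--                 current_polarity = '+'
--             else:
--                 current_polarity = '-'
--
--             ami_string.append(current_polarity)
--
--     return ''.join(ami_string)
-- ===== SOURCE B (Python) =====
-- from itertools import accumulate
--
-- def ami_encode(binary_string):
--     ones = accumulate((0 if b == '0' else 1) for b in binary_string)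
--     return ''.join('0' if b == '0' else ('+' if c % 2 == 1 else '-')
--                    for b, c in zip(binary_string, ones))
-- ===== Notes on version B (the rewrite author's own statement) =====
-- stated objective: alternative
-- what changed: Replaced the single stateful loop with a mutable polarity flag by two passes: a running cumulative count of one-bits (itertools.accumulate) followed by a stateless map that picks the pulse sign from the parity of that count.
import Mathlib
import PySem

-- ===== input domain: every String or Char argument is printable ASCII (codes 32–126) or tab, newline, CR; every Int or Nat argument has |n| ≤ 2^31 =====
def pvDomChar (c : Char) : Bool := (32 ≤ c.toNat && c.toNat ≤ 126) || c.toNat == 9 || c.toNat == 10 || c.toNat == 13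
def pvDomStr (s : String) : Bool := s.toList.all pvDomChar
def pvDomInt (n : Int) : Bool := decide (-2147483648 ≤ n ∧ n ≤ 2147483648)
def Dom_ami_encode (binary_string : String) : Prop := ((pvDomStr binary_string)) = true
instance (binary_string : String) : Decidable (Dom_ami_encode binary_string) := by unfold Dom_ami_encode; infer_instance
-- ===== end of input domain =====

-- ===== PORT A =====
-- B changes the decomposition only (one stateful loop -> count pass + stateless map); return values proved equal on Dom.
-- A: one stateful pass flipping a polarity flag; acc is the joined char list.
def amiStep (st : List Char × Char) (bit : Char) : List Char × Char :=
  if bit = '0' then (st.1 ++ ['0'], st.2)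
  else
    let pol := if st.2 = '-' then '+' else '-'
    (st.1 ++ [pol], pol)

def ami_encode (binary_string : String) : String :=
  String.ofList (binary_string.toList.foldl amiStep ([], '-')).1

-- ===== PORT B =====
-- B (Source B): cumulative one-counts via accumulate (= scanl then tail), then a
-- stateless zip-map choosing '+'/'-' from the parity of the running count.
def ami_encode_alt (binary_string : String) : String :=
  String.ofList ((binary_string.toList.zip
      (List.scanl (· + ·) 0
        (binary_string.toList.map (fun b => if b = '0' then (0 : Nat) else 1))).tail).map
    (fun p => if p.1 = '0' then '0' else if p.2 % 2 = 1 then '+' else '-'))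

-- ===== PRECONDITION & SPEC =====
def Spec_ami_encode (binary_string : String) (out : String) : Prop := out = ami_encode_alt binary_string
instance (binary_string : String) (out : String) : Decidable (Spec_ami_encode binary_string out) := by unfold Spec_ami_encode; infer_instance

-- ===== CLAIM (what is proved, stated in full; the proofs are below) =====
def Claim_equal_ami_encode : Prop := ∀ (binary_string : String), Dom_ami_encode binary_string → Spec_ami_encode binary_string (ami_encode binary_string)

-- ===== LEMMAS AND PROOFS =====
-- reference: the output char list given the count k of ones seen so far
def amiRef : List Char → Nat → List Char
  | [], _ => []
  | b :: rest, k =>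
    if b = '0' then '0' :: amiRef rest k
    else (if (k + 1) % 2 = 1 then '+' else '-') :: amiRef rest (k + 1)

def polOf (k : Nat) : Char := if k % 2 = 1 then '+' else '-'

theorem amiA_ref : ∀ (l : List Char) (acc : List Char) (k : Nat),
    (l.foldl amiStep (acc, polOf k)).1 = acc ++ amiRef l k := by
  intro l
  induction l with
  | nil => intro acc k; simp [amiRef]
  | cons b rest ih =>
    intro acc k
    by_cases hb : b = '0'
    · simp [amiStep, amiRef, hb, ih]
    · have hpol : (if polOf k = '-' then '+' else '-') = polOf (k + 1) := by
        rcases Nat.even_or_odd k with hk | hk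
        · have : k % 2 = 0 := Nat.even_iff.mp hk
          simp [polOf, this, Nat.add_mod]
        · have : k % 2 = 1 := Nat.odd_iff.mp hk
          simp [polOf, this, Nat.add_mod]
      simp only [List.foldl_cons, amiStep, if_neg hb]
      rw [hpol, ih]
      simp [amiRef, hb, polOf]

theorem scanl_head_tail {α β : Type} (f : β → α → β) (k : β) (xs : List α) :
    List.scanl f k xs = k :: (List.scanl f k xs).tail := by
  cases xs <;> simp [List.scanl_nil, List.scanl_cons]

theorem amiB_ref : ∀ (l : List Char) (k : Nat),
    (l.zip (List.scanl (· + ·) k (l.map (fun b => if b = '0' then (0 : Nat) else 1))).tail).map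
        (fun p => if p.1 = '0' then '0' else if p.2 % 2 = 1 then '+' else '-')
      = amiRef l k := by
  intro l
  induction l with
  | nil => intro k; simp [amiRef]
  | cons b rest ih =>
    intro k
    rw [List.map_cons, List.scanl_cons, List.tail_cons,
        scanl_head_tail (· + ·) (k + if b = '0' then (0 : Nat) else 1), List.zip_cons_cons,
        List.map_cons, ih]
    by_cases hb : b = '0' <;> simp [amiRef, hb]

-- ===== VERDICT (by name: the statement is the Claim_ definition above) =====
theorem ami_encode_spec : Claim_equal_ami_encode := by
  intro s _
  unfold Spec_ami_encode ami_encode ami_encode_alt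
  have hA := amiA_ref s.toList [] 0
  have hB := amiB_ref s.toList 0
  simp only [polOf, Nat.zero_mod] at hA
  simp at hA
  rw [hA, hB]
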